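-- pv_equiv track=rewrite | github.com/dev-yihyun/Algorithm | programmers/Lv0_120846.py | solution
-- ===== SOURCE A (Python) =====
-- def solution(n):
--     answer = 0
--     cnt=0
--     for i in range(4,n+1):
--         for j in range(1,i+1):
--             if i%j ==0:
--                 cnt+=1
--         if cnt >=3:
--             answer+=1
--             cnt=0
--     return answer
-- ===== SOURCE B (Python) =====
-- def _is_composite(i):
--     j = 2
--     while j * j <= i:
--         if i % j == 0:
--             return True
--         j += 1
--     return False
--
-- def solution(n):
--     answer = 0
--     for i in range(4, n + 1):
--         if _is_composite(i):
--             answer += 1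
--     return answer
-- ===== Notes on version B (the rewrite author's own statement) =====
-- stated objective: faster
-- what changed: A counts divisors of every i by trying all j in 1..i and threads an accumulated counter whose threshold test detects composites; B simply counts the i in 4..n that pass an O(sqrt(i)) trial-division compositeness test (the accumulated counter provably never changes the result, since after every prime comes an even composite that resets it).
import Mathlib
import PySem

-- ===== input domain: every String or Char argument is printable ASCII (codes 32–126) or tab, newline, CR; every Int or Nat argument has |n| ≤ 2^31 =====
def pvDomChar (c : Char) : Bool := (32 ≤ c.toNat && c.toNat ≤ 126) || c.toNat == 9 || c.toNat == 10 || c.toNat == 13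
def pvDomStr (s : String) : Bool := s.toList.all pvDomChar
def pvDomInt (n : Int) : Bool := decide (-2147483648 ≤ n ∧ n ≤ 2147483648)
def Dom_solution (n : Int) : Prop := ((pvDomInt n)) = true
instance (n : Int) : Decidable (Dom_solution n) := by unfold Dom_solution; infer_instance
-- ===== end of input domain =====

-- B counts the i in 4..n that pass an O(sqrt i) trial-division compositeness test,
-- replacing A's O(i) full divisor count per i with its accumulated-counter threshold: faster (asymptotic).

-- ===== PORT A =====
def solution (n : Int) : Int :=
  ((PySem.List.pyRange 4 (n + 1) 1).foldl
    (fun (st : Int × Int) i =>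
      let cnt := (PySem.List.pyRange 1 (i + 1) 1).foldl
        (fun cnt j => if PySem.Int.mod i j == 0 then cnt + 1 else cnt) st.2
      if 3 ≤ cnt then (st.1 + 1, 0) else (st.1, cnt))
    (0, 0)).1

-- ===== PORT B =====
-- helper: Source B's `_is_composite` while-loop, j counting up from the given start
def isCompositeAux (i j : Int) : Bool :=
  if h : j * j ≤ i then
    if PySem.Int.mod i j == 0 then true
    else isCompositeAux i (j + 1)
  else false
termination_by (i + 1 - j).toNat
decreasing_by
  rcases Int.lt_or_le j 1 with h1 | h1
  · have hj : (0 : Int) ≤ j * j := mul_self_nonneg j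
    omega
  · have hj : j ≤ j * j := by nlinarith
    omega

def solution_alt (n : Int) : Int :=
  (PySem.List.pyRange 4 (n + 1) 1).foldl
    (fun ans i => if isCompositeAux i 2 then ans + 1 else ans) 0

-- ===== PRECONDITION & SPEC =====
def Spec_solution (n : Int) (out : Int) : Prop := out = solution_alt n
instance (n : Int) (out : Int) : Decidable (Spec_solution n out) := by unfold Spec_solution; infer_instance

-- ===== CLAIM (what is proved, stated in full; the proofs are below) =====
def Claim_equal_solution : Prop := ∀ (n : Int), Dom_solution n → Spec_solution n (solution n)

-- ===== LEMMAS AND PROOFS =====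

-- number of divisors of i that A's inner loop counts
def dcount (i : Int) : Nat :=
  (PySem.List.pyRange 1 (i + 1) 1).countP (fun j => PySem.Int.mod i j == 0)

lemma aux_true_iff_fuel (i : Int) : ∀ (fuel : Nat) (j : Int), 2 ≤ j → (i + 1 - j).toNat ≤ fuel →
    (isCompositeAux i j = true ↔ ∃ k, j ≤ k ∧ k * k ≤ i ∧ PySem.Int.mod i k = 0) := by
  intro fuel
  induction fuel with
  | zero =>
    intro j hj hf
    have hji : i < j := by omega
    have hne : ¬ j * j ≤ i := by nlinarith
    rw [isCompositeAux]
    simp only [dif_neg hne]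
    constructor
    · intro hfalse; exact absurd hfalse (by simp)
    · rintro ⟨k, hk, hkk, -⟩
      exact absurd hkk (by nlinarith)
  | succ fuel ih =>
    intro j hj hf
    rw [isCompositeAux]
    by_cases h : j * j ≤ i
    · simp only [dif_pos h]
      by_cases hm : PySem.Int.mod i j = 0
      · simp only [hm, beq_self_eq_true, if_true, true_iff]
        exact ⟨j, le_refl j, h, hm⟩
      · have hmb : (PySem.Int.mod i j == 0) = false := by simpa using hm
        simp only [hmb, Bool.false_eq_true, if_false]
        have hji : j ≤ i := by nlinarith
        rw [ih (j + 1) (by omega) (by omega)]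
        constructor
        · rintro ⟨k, hk, hkk, hkm⟩; exact ⟨k, by omega, hkk, hkm⟩
        · rintro ⟨k, hk, hkk, hkm⟩
          refine ⟨k, ?_, hkk, hkm⟩
          rcases eq_or_lt_of_le hk with rfl | hlt
          · exact absurd hkm hm
          · omega
    · simp only [dif_neg h]
      constructor
      · intro hfalse; exact absurd hfalse (by simp)
      · rintro ⟨k, hk, hkk, -⟩
        exact absurd hkk (by nlinarith)

lemma aux_true_iff (i j : Int) (hj : 2 ≤ j) :
    isCompositeAux i j = true ↔ ∃ k, j ≤ k ∧ k * k ≤ i ∧ PySem.Int.mod i k = 0 :=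
  aux_true_iff_fuel i (i + 1 - j).toNat j hj (le_refl _)

lemma three_le_countP {l : List Int} {p : Int → Bool} {a b c : Int}
    (ha : a ∈ l) (hb : b ∈ l) (hc : c ∈ l)
    (pa : p a = true) (pb : p b = true) (pc : p c = true)
    (hab : a ≠ b) (hac : a ≠ c) (hbc : b ≠ c) : 3 ≤ l.countP p := by
  classical
  have hsub : ({a, b, c} : Finset Int) ⊆ (l.filter p).toFinset := by
    intro x hx
    simp only [Finset.mem_insert, Finset.mem_singleton] at hx
    rcases hx with rfl | rfl | rfl <;> simp [ha, hb, hc, pa, pb, pc]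
  have hcard : ({a, b, c} : Finset Int).card = 3 := by
    rw [Finset.card_insert_of_notMem (by simp [hab, hac]),
        Finset.card_insert_of_notMem (by simp [hbc]), Finset.card_singleton]
  calc 3 = ({a, b, c} : Finset Int).card := hcard.symm
    _ ≤ (l.filter p).toFinset.card := Finset.card_le_card hsub
    _ ≤ (l.filter p).length := (l.filter p).toFinset_card_le
    _ = l.countP p := (List.countP_eq_length_filter).symm

lemma countP_eq_two {l : List Int} (hnd : l.Nodup) {p : Int → Bool} {a b : Int} (hab : a ≠ b)
    (ha : a ∈ l) (hb : b ∈ l) (pa : p a = true) (pb : p b = true)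
    (honly : ∀ x ∈ l, p x = true → x = a ∨ x = b) : l.countP p = 2 := by
  classical
  have hnd' : (l.filter p).Nodup := hnd.filter p
  have hts : (l.filter p).toFinset = {a, b} := by
    ext x
    simp only [List.mem_toFinset, List.mem_filter, Finset.mem_insert, Finset.mem_singleton]
    constructor
    · rintro ⟨hx, hpx⟩; exact honly x hx hpx
    · rintro (rfl | rfl)
      · exact ⟨ha, pa⟩
      · exact ⟨hb, pb⟩
  have hlen : (l.filter p).length = ({a, b} : Finset Int).card := by
    rw [← hts, List.toFinset_card_of_nodup hnd']
  rw [List.countP_eq_length_filter, hlen,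
      Finset.card_insert_of_notMem (by simp [hab]), Finset.card_singleton]

lemma dcount_ge_three (i : Int) (hi : 4 ≤ i) (h : isCompositeAux i 2 = true) : 3 ≤ dcount i := by
  obtain ⟨k, hk2, hkk, hkm⟩ := (aux_true_iff i 2 (le_refl 2)).mp h
  have hki : k < i := by nlinarith
  have hmem : ∀ x : Int, 1 ≤ x → x ≤ i → x ∈ PySem.List.pyRange 1 (i + 1) 1 := by
    intro x h1 h2; exact PySem.List.mem_pyRange_one.mpr ⟨h1, by omega⟩
  refine three_le_countP (hmem 1 (le_refl 1) (by omega)) (hmem k (by omega) (by omega))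
    (hmem i (by omega) (le_refl i)) ?_ ?_ ?_ (by omega) (by omega) (by omega)
  · simp
  · simp [hkm]
  · simp [PySem.Int.mod_eq_zero_iff_dvd]

lemma dcount_eq_two (i : Int) (hi : 4 ≤ i) (h : isCompositeAux i 2 = false) : dcount i = 2 := by
  have hno : ∀ k : Int, 2 ≤ k → k * k ≤ i → PySem.Int.mod i k ≠ 0 := by
    intro k hk2 hkk hkm
    have : isCompositeAux i 2 = true := (aux_true_iff i 2 (le_refl 2)).mpr ⟨k, hk2, hkk, hkm⟩
    rw [h] at this; exact absurd this (by simp)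
  refine countP_eq_two (PySem.List.nodup_pyRange_one 1 (i + 1)) (show (1 : Int) ≠ i by omega)
    (PySem.List.mem_pyRange_one.mpr ⟨le_refl 1, by omega⟩)
    (PySem.List.mem_pyRange_one.mpr ⟨by omega, by omega⟩)
    (by simp)
    (by simp [PySem.Int.mod_eq_zero_iff_dvd]) ?_
  intro x hx hpx
  have hxr := PySem.List.mem_pyRange_one.mp hx
  have hdvd : x ∣ i := (PySem.Int.mod_eq_zero_iff_dvd i x).mp (by simpa using hpx)
  by_cases hx1 : x = 1
  · exact Or.inl hx1
  by_cases hxi : x = i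
  · exact Or.inr hxi
  exfalso
  have hx2 : 2 ≤ x := by omega
  have hxlt : x < i := by omega
  obtain ⟨q, hq⟩ := hdvd
  have hq2 : 2 ≤ q := by nlinarith
  have hdvd2 : x ∣ i := ⟨q, hq⟩
  rcases le_total x q with hle | hle
  · exact hno x hx2 (by nlinarith) (by simpa [PySem.Int.mod_eq_zero_iff_dvd] using hdvd2)
  · have hqd : q ∣ i := ⟨x, by rw [hq]; ring⟩
    exact hno q hq2 (by nlinarith) (by simpa [PySem.Int.mod_eq_zero_iff_dvd] using hqd)

-- the successor of a non-composite i ≥ 4 is composite (i is odd, so 2 divides i+1)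
lemma succ_composite (i : Int) (hi : 4 ≤ i) (h : isCompositeAux i 2 = false) :
    isCompositeAux (i + 1) 2 = true := by
  have hno : ¬ (2 * 2 ≤ i ∧ PySem.Int.mod i 2 = 0) := by
    rintro ⟨hkk, hkm⟩
    have : isCompositeAux i 2 = true := (aux_true_iff i 2 (le_refl 2)).mpr ⟨2, le_refl 2, hkk, hkm⟩
    rw [h] at this; exact absurd this (by simp)
  have hodd : ¬ (2 : Int) ∣ i := by
    intro hd
    exact hno ⟨by omega, (PySem.Int.mod_eq_zero_iff_dvd i 2).mpr hd⟩
  have heven : (2 : Int) ∣ (i + 1) := by omega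
  exact (aux_true_iff (i + 1) 2 (le_refl 2)).mpr
    ⟨2, le_refl 2, by omega, (PySem.Int.mod_eq_zero_iff_dvd (i + 1) 2).mpr heven⟩

-- loop equivalence: A's accumulated counter is always 0, or 2 right after a prime,
-- in which case the next element (tracked by p) is composite and counted by both.
lemma fold_eq (b : Int) : ∀ (fuel : Nat) (m : Int) (ans : Int) (p : Bool),
    (b - m).toNat ≤ fuel → 4 ≤ m → (p = true → m < b → isCompositeAux m 2 = true) →
    ((PySem.List.pyRange m b 1).foldl
      (fun (st : Int × Int) i =>
        let cnt := (PySem.List.pyRange 1 (i + 1) 1).foldl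
          (fun cnt j => if PySem.Int.mod i j == 0 then cnt + 1 else cnt) st.2
        if 3 ≤ cnt then (st.1 + 1, 0) else (st.1, cnt))
      (ans, if p then (2 : Int) else 0)).1
    =
    (PySem.List.pyRange m b 1).foldl
      (fun ans i => if isCompositeAux i 2 then ans + 1 else ans) ans := by
  intro fuel
  induction fuel with
  | zero =>
    intro m ans p hf hm hp
    have hb : b ≤ m := by omega
    rw [PySem.List.pyRange_one_eq_nil hb]; rfl
  | succ fuel ih =>
    intro m ans p hf hm hp
    rcases Int.lt_or_le m b with hlt | hge
    · rw [PySem.List.pyRange_one_cons hlt]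
      simp only [List.foldl_cons]
      rw [PySem.List.foldl_if_add_one]
      cases hC : isCompositeAux m 2 with
      | true =>
        have h3 : 3 ≤ dcount m := dcount_ge_three m hm hC
        have hcnt : 3 ≤ (if p then (2 : Int) else 0) + ((PySem.List.pyRange 1 (m + 1) 1).countP
            (fun j => PySem.Int.mod m j == 0) : Int) := by
          unfold dcount at h3; cases p <;> simp <;> omega
        rw [if_pos hcnt]
        have := ih (m + 1) (ans + 1) false (by omega) (by omega) (by simp)
        simpa using this
      | false =>
        cases p with
        | true => exact absurd (hp rfl hlt) (by simp [hC])
        | false =>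
          have h2 : dcount m = 2 := dcount_eq_two m hm hC
          have hval : (if false then (2 : Int) else 0) + ((PySem.List.pyRange 1 (m + 1) 1).countP
              (fun j => PySem.Int.mod m j == 0) : Int) = 2 := by
            unfold dcount at h2; simp; omega
          rw [hval, if_neg (by omega)]
          have := ih (m + 1) ans true (by omega) (by omega)
            (fun _ _ => succ_composite m hm hC)
          simpa [hC] using this
    · rw [PySem.List.pyRange_one_eq_nil hge]; rfl

-- ===== VERDICT (by name: the statement is the Claim_ definition above) =====
theorem solution_spec : Claim_equal_solution := by
  intro n _
  unfold Spec_solution solution solution_alt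
  have := fold_eq (n + 1) (n + 1 - 4).toNat 4 0 false (le_refl _) (le_refl _) (by simp)
  simpa using this
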